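-- pv_equiv track=rewrite | github.com/MarcoClementi/esercizio_info | clementi_030.py | controlla_cartella
-- ===== SOURCE A (Python) =====
-- def controlla_cartella(cartella, numeri_estratti):
--     stato = [False] * 4
--     for riga in cartella.values():
--         if set(riga).issubset(set(numeri_estratti)):
--             if stato[0] == False: stato[0] = True
--             elif stato[1] == False: stato[1] = True
--             elif stato[2] == False: stato[2] = True
--             else: stato[3] = True
--     return stato
-- ===== SOURCE B (Python) =====
-- def controlla_cartella(cartella, numeri_estratti):
--     estratti = set(numeri_estratti)
--
--     def fill(rows, slots):
--         # emit one True per completed row found, recursing on the rest;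
--         # stop as soon as all slots are used, pad with False when rows run out
--         if slots == 0:
--             return []
--         if not rows:
--             return [False] * slots
--         head, rest = rows[0], rows[1:]
--         if set(head) <= estratti:
--             return [True] + fill(rest, slots - 1)
--         return fill(rest, slots)
--
--     return fill(list(cartella.values()), 4)
-- ===== Notes on version B (the rewrite author's own statement) =====
-- stated objective: alternative
-- what changed: Replaces A's stateful 4-flag if/elif state machine over all rows by a recursive slot-filling scan that emits one True per completed row, stops as soon as the 4 slots are used, and pads with False; set(numeri_estratti) is built once instead of once per row.
import Mathlib
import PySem

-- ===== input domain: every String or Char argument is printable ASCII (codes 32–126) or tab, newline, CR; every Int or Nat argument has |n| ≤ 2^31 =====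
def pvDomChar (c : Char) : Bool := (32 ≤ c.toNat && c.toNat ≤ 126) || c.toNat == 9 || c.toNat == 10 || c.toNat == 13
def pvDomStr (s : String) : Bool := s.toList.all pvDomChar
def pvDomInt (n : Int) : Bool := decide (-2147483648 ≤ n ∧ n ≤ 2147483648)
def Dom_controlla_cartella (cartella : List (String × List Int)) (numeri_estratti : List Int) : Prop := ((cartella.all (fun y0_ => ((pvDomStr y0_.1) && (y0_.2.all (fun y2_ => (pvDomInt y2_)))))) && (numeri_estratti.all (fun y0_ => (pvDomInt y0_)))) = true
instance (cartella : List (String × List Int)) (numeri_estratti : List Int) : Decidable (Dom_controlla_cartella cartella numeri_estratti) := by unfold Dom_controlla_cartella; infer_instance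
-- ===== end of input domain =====

-- ===== PORT A =====
-- B replaces A's 4-flag if/elif state machine by a recursive slot-filling scan that
-- stops once 4 completed rows are found and pads with False. Same return value everywhere.
def controlla_cartella (cartella : List (String × List Int)) (numeri_estratti : List Int) : List Bool :=
  cartella.foldl (fun stato kv =>
    if kv.2.all (fun x => numeri_estratti.contains x) then
      if stato.getD 0 true = false then stato.set 0 true
      else if stato.getD 1 true = false then stato.set 1 true
      else if stato.getD 2 true = false then stato.set 2 true
      else stato.set 3 true
    else stato) [false, false, false, false]

-- ===== PORT B =====
-- fill: consume one slot per completed row, stop at 0 slots, pad with False at the end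
def fillB (estratti : List Int) (rows : List (List Int)) (slots : Nat) : List Bool :=
  match slots, rows with
  | 0, _ => []
  | Nat.succ s, [] => List.replicate (s + 1) false
  | Nat.succ s, head :: rest =>
    if head.all (fun x => estratti.contains x) then true :: fillB estratti rest s
    else fillB estratti rest (s + 1)

def controlla_cartella_alt (cartella : List (String × List Int)) (numeri_estratti : List Int) : List Bool :=
  fillB numeri_estratti (cartella.map Prod.snd) 4

-- ===== PRECONDITION & SPEC =====
def Spec_controlla_cartella (cartella : List (String × List Int)) (numeri_estratti : List Int) (out : List Bool) : Prop := out = controlla_cartella_alt cartella numeri_estratti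
instance (cartella : List (String × List Int)) (numeri_estratti : List Int) (out : List Bool) : Decidable (Spec_controlla_cartella cartella numeri_estratti out) := by unfold Spec_controlla_cartella; infer_instance

-- ===== CLAIM (what is proved, stated in full; the proofs are below) =====
def Claim_equal_controlla_cartella : Prop := ∀ (cartella : List (String × List Int)) (numeri_estratti : List Int), Dom_controlla_cartella cartella numeri_estratti → Spec_controlla_cartella cartella numeri_estratti (controlla_cartella cartella numeri_estratti)

-- ===== LEMMAS AND PROOFS =====

-- stateOf c : the prefix-of-Trues state with c cells set
def stateOf (c : Nat) : List Bool := (List.range 4).map (fun i => decide (i < c))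

lemma step_stateOf (c : Nat) (hc : c ≤ 4) (stato : List Bool) (h : stato = stateOf c) :
    (if stato.getD 0 true = false then stato.set 0 true
     else if stato.getD 1 true = false then stato.set 1 true
     else if stato.getD 2 true = false then stato.set 2 true
     else stato.set 3 true) = stateOf (min (c + 1) 4) := by
  subst h
  interval_cases c <;> decide

lemma fold_stateOf (numeri_estratti : List Int) (cartella : List (String × List Int))
    (c : Nat) (hc : c ≤ 4) :
    cartella.foldl (fun stato kv =>
      if kv.2.all (fun x => numeri_estratti.contains x) then
        if stato.getD 0 true = false then stato.set 0 true
        else if stato.getD 1 true = false then stato.set 1 true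
        else if stato.getD 2 true = false then stato.set 2 true
        else stato.set 3 true
      else stato) (stateOf c) =
    stateOf (min (c + cartella.countP (fun kv => kv.2.all (fun x => numeri_estratti.contains x))) 4) := by
  induction cartella generalizing c with
  | nil => simp only [List.foldl_nil, List.countP_nil, Nat.add_zero, Nat.min_eq_left hc]
  | cons kv tl ih =>
    simp only [List.foldl_cons, List.countP_cons]
    by_cases hp : kv.2.all (fun x => numeri_estratti.contains x) = true
    · rw [if_pos hp, step_stateOf c hc _ rfl, ih _ (by omega)]
      have : min (min (c + 1) 4 + tl.countP (fun kv => kv.2.all (fun x => numeri_estratti.contains x))) 4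
           = min (c + (tl.countP (fun kv => kv.2.all (fun x => numeri_estratti.contains x)) + (if (kv.2.all (fun x => numeri_estratti.contains x)) = true then 1 else 0))) 4 := by
        rw [if_pos hp]; omega
      rw [this]
    · rw [if_neg hp, ih _ hc, if_neg hp]; simp

-- fillB produces min(count, slots) Trues followed by the remaining slots of Falses
lemma fillB_eq (estratti : List Int) (rows : List (List Int)) (slots : Nat) :
    fillB estratti rows slots =
      List.replicate (min (rows.countP (fun r => r.all (fun x => estratti.contains x))) slots) true
        ++ List.replicate (slots - min (rows.countP (fun r => r.all (fun x => estratti.contains x))) slots) false := by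
  induction rows generalizing slots with
  | nil => cases slots <;> simp [fillB]
  | cons head rest ih =>
    cases slots with
    | zero => simp [fillB]
    | succ s =>
      simp only [fillB, List.countP_cons]
      by_cases hp : head.all (fun x => estratti.contains x) = true
      · rw [if_pos hp, ih, if_pos hp]
        have h1 : min (rest.countP (fun r => r.all (fun x => estratti.contains x)) + 1) (s + 1)
            = min (rest.countP (fun r => r.all (fun x => estratti.contains x))) s + 1 := by omega
        have h2 : s + 1 - (min (rest.countP (fun r => r.all (fun x => estratti.contains x))) s + 1)
            = s - min (rest.countP (fun r => r.all (fun x => estratti.contains x))) s := by omega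
        rw [h1, h2, List.replicate_succ, List.cons_append]
      · rw [if_neg hp, ih, if_neg hp]; simp

lemma stateOf_min_eq_replicate (c : Nat) :
    stateOf (min c 4) = List.replicate (min c 4) true ++ List.replicate (4 - min c 4) false := by
  have hm : min c 4 ≤ 4 := Nat.min_le_right _ _
  set m := min c 4 with hmdef
  clear_value m
  interval_cases m <;> decide

-- ===== VERDICT (by name: the statement is the Claim_ definition above) =====
theorem controlla_cartella_spec : Claim_equal_controlla_cartella := by
  intro cartella numeri_estratti _
  unfold Spec_controlla_cartella controlla_cartella controlla_cartella_alt
  have h0 : ([false, false, false, false] : List Bool) = stateOf 0 := by decide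
  rw [h0, fold_stateOf numeri_estratti cartella 0 (by omega), fillB_eq, List.countP_map]
  simp only [Nat.zero_add, stateOf_min_eq_replicate, Function.comp_def]
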